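-- pv_equiv track=rewrite | github.com/IvanDzanija/competitive_programming | EverybodyCodes/2024/quest01.py | part3
-- ===== SOURCE A (Python) =====
-- def part1(a):
--     ans = 0
--     for c in a:
--         if c == "B":
--             ans += 1
--         elif c == "C":
--             ans += 3
--         elif c == "D":
--             ans += 5
--     return ans
--
-- def part3(a):
--     ans = 0
--     for i in range(0, len(a), 3):
--         s = a[i : i + 3]
--         s = s.replace("x", "")
--         if len(s) == 1:
--             ans += part1(s)
--         elif len(s) == 2:
--             ans += part1(s) + 2
--         elif len(s) == 3:
--             ans += part1(s) + 6
--     return ans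
-- ===== SOURCE B (Python) =====
-- def part3(a):
--     score = {"B": 1, "C": 3, "D": 5}
--     base = sum(score.get(c, 0) for c in a)
--     bonus = {2: 2, 3: 6}
--     extra = 0
--     rest = a
--     while rest:
--         group, rest = rest[:3], rest[3:]
--         extra += bonus.get(sum(c != "x" for c in group), 0)
--     return base + extra
-- ===== Notes on version B (the rewrite author's own statement) =====
-- stated objective: alternative
-- what changed: B scores every character in one pass over the whole string (valid because excluded and unknown characters score 0 regardless of grouping) and then consumes the string in chunks of 3 with a while loop that only counts the scoring characters per chunk and adds the size bonus from a {2:2,3:6} table, instead of A's per-group slice/replace/re-score index loop.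
import Mathlib
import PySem

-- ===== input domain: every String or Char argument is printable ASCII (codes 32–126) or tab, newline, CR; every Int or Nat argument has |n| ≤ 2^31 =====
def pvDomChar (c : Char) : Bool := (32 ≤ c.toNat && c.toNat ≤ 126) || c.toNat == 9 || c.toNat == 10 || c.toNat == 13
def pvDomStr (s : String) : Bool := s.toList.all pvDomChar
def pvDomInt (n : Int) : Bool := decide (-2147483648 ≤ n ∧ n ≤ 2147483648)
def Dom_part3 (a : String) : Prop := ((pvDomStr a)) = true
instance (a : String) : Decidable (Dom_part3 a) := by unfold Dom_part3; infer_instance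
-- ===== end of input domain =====

-- B scores every character in one pass over the whole string, then adds per-chunk-of-3 size
-- bonuses from a {2:2,3:6} table, instead of A's per-group slice/replace/re-score loop (alternative decomposition).


-- ===== PORT A =====
def part1 (s : String) : Int :=
  s.toList.foldl (fun ans c =>
    if c = 'B' then ans + 1
    else if c = 'C' then ans + 3
    else if c = 'D' then ans + 5
    else ans) 0

def part3 (a : String) : Int :=
  (PySem.List.pyRange 0 (PySem.Str.len a) 3).foldl (fun ans i =>
    let s := PySem.List.slice a.toList (some i) (some (i + 3))
    let s2 := PySem.Chars.replace s ['x'] []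
    if s2.length = 1 then ans + part1 (String.ofList s2)
    else if s2.length = 2 then ans + (part1 (String.ofList s2) + 2)
    else if s2.length = 3 then ans + (part1 (String.ofList s2) + 6)
    else ans) 0

-- ===== PORT B =====
-- Source B's `while rest:` loop: peel group = rest[:3], count non-'x' chars, add the bonus-table value
def part3AltLoop (bonus : PySem.Dict Int Int) (extra : Int) (rest : List Char) : Int :=
  if rest = [] then extra
  else
    let group := PySem.List.slice rest none (some 3)
    let rest' := PySem.List.slice rest (some 3) none
    let cnt := (group.map (fun c => if c ≠ 'x' then (1 : Int) else 0)).sum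
    part3AltLoop bonus (extra + bonus.getD cnt 0) rest'
termination_by rest.length
decreasing_by
  rw [PySem.List.slice_from _ (show (0:Int) ≤ 3 by norm_num)]
  rename_i h
  have : rest.length ≠ 0 := by simpa [List.length_eq_zero_iff] using h
  simp; omega

def part3_alt (a : String) : Int :=
  let score : PySem.Dict Char Int := PySem.Dict.ofList [('B', 1), ('C', 3), ('D', 5)]
  let base := (a.toList.map (fun c => score.getD c 0)).sum
  let bonus : PySem.Dict Int Int := PySem.Dict.ofList [(2, 2), (3, 6)]
  base + part3AltLoop bonus 0 a.toList

-- ===== PRECONDITION & SPEC =====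
def Spec_part3 (a : String) (out : Int) : Prop := out = part3_alt a
instance (a : String) (out : Int) : Decidable (Spec_part3 a out) := by unfold Spec_part3; infer_instance

-- ===== CLAIM (what is proved, stated in full; the proofs are below) =====
def Claim_equal_part3 : Prop := ∀ (a : String), Dom_part3 a → Spec_part3 a (part3 a)

-- ===== LEMMAS AND PROOFS =====

-- character score as a plain function (proofs only)
def scA (c : Char) : Int := if c = 'B' then 1 else if c = 'C' then 3 else if c = 'D' then 5 else 0

-- B's bonus dictionary
def bonusD : PySem.Dict Int Int := PySem.Dict.ofList [(2, 2), (3, 6)]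

-- A's loop body as "accumulator + term"
def termA (l : List Char) (i : Int) : Int :=
  let s2 := (PySem.List.slice l (some i) (some (i + 3))).filter (· ≠ 'x')
  if s2.length = 1 then (s2.map scA).sum
  else if s2.length = 2 then (s2.map scA).sum + 2
  else if s2.length = 3 then (s2.map scA).sum + 6
  else 0

lemma part1_eq_sum (s : List Char) : part1 (String.ofList s) = (s.map scA).sum := by
  have hb : (fun (ans : Int) c =>
      if c = 'B' then ans + 1 else if c = 'C' then ans + 3 else if c = 'D' then ans + 5 else ans)
      = fun (ans : Int) c => ans + scA c := by
    funext ans c; simp only [scA]; split_ifs <;> ring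
  simp [part1, hb, PySem.List.foldl_add]

lemma score_getD (c : Char) :
    (PySem.Dict.ofList [('B', (1:Int)), ('C', 3), ('D', 5)]).getD c 0 = scA c := by
  simp [PySem.Dict.ofList, PySem.Dict.update, PySem.Dict.getD_insert, scA]
  split_ifs <;> simp_all [PySem.Dict.getD, PySem.Dict.get?, PySem.Dict.empty]

lemma bonus_getD (n : Nat) (h : n ≤ 3) :
    bonusD.getD (n : Int) 0 = if n = 2 then 2 else if n = 3 then 6 else 0 := by
  interval_cases n <;> decide

lemma replace_go_x : ∀ (fuel : Nat) (l acc : List Char), l.length ≤ fuel →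
    PySem.Chars.replace.go ['x'] [] fuel l acc = acc.reverse ++ l.filter (· ≠ 'x') := by
  intro fuel
  induction fuel with
  | zero =>
    intro l acc h
    have : l = [] := by cases l <;> simp_all
    subst this; simp [PySem.Chars.replace.go]
  | succ n ih =>
    intro l acc h
    cases l with
    | nil => simp [PySem.Chars.replace.go]
    | cons c t =>
      rw [PySem.Chars.replace.go]
      by_cases hc : c = 'x'
      · subst hc
        rw [if_pos (by simp [List.isPrefixOf])]
        have hdrop : List.drop (['x'].length) ('x' :: t) = t := rfl
        have hrev : ([] : List Char).reverse ++ acc = acc := rfl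
        rw [hdrop, hrev, ih t acc (by simpa using h)]
        simp [List.filter_cons]
      · rw [if_neg (by simp [List.isPrefixOf]; exact fun he => (hc he.symm).elim)]
        rw [ih t (c :: acc) (by simpa using h)]
        simp [List.filter_cons, hc]

lemma replace_x (s : List Char) : PySem.Chars.replace s ['x'] [] = s.filter (· ≠ 'x') := by
  rw [PySem.Chars.replace]
  simp [replace_go_x s.length s [] le_rfl]

lemma sum_scA_filter (s : List Char) :
    ((s.filter (· ≠ 'x')).map scA).sum = (s.map scA).sum := by
  induction s with
  | nil => simp
  | cons c t ih =>
    rw [List.filter_cons]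
    by_cases hc : c = 'x'
    · subst hc
      rw [if_neg (by simp), ih]
      simp [scA]
    · rw [if_pos (by simp [hc])]
      simp only [List.map_cons, List.sum_cons]
      rw [ih]

lemma cnt_eq_filter_length (g : List Char) :
    (g.map (fun c => if c ≠ 'x' then (1 : Int) else 0)).sum = ((g.filter (· ≠ 'x')).length : Int) := by
  have h : (fun c => if c ≠ 'x' then (1 : Int) else 0)
      = fun c => if (!(c == 'x')) = true then (1 : Int) else 0 := by
    funext c; by_cases hc : c = 'x' <;> simp [hc]
  rw [h, PySem.List.sum_map_ite_one_zero, List.countP_eq_length_filter]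
  have hpred : List.filter (fun c => !(c == 'x')) g = List.filter (fun x => decide (x ≠ 'x')) g :=
    List.filter_congr (fun c _ => by by_cases hc : c = 'x' <;> simp [hc])
  rw [hpred]

lemma pyRange3_nil (b : Int) (h : b ≤ 0) : PySem.List.pyRange 0 b 3 = [] := by
  rw [PySem.List.pyRange_of_pos _ _ (by norm_num)]
  rw [if_neg (by omega)]
  simp

lemma pyRange3_cons (b : Int) (h : 0 < b) :
    PySem.List.pyRange 0 b 3 = 0 :: (PySem.List.pyRange 0 (b - 3) 3).map (· + 3) := by
  rw [PySem.List.pyRange_of_pos _ _ (by norm_num), PySem.List.pyRange_of_pos _ _ (by norm_num)]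
  have hcount : (if (0:Int) < b then ((b - 0 + 3 - 1) / 3).toNat else 0)
      = (if (0:Int) < b - 3 then ((b - 3 - 0 + 3 - 1) / 3).toNat else 0) + 1 := by
    split_ifs <;> omega
  rw [hcount, List.range_succ_eq_map, List.map_cons, List.map_map]
  refine congrArg₂ List.cons (by norm_num) ?_
  rw [List.map_map]
  apply List.map_congr_left
  intro k _
  simp only [Function.comp_apply, Nat.succ_eq_add_one]
  push_cast
  ring

lemma mem_range3_nonneg {b i : Int} (hi : i ∈ PySem.List.pyRange 0 b 3) : 0 ≤ i := by
  have := (PySem.List.mem_pyRange_iff_of_pos (by norm_num : (0:Int) < 3) i).mp hi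
  omega

lemma termA_shift (l : List Char) (i : Int) (hi : 0 ≤ i) :
    termA l (i + 3) = termA (l.drop 3) i := by
  obtain ⟨k, rfl⟩ : ∃ k : Nat, i = (k : Int) := ⟨i.toNat, (Int.toNat_of_nonneg hi).symm⟩
  unfold termA
  have h1 : ((k : Int) + 3) = ((k + 3 : Nat) : Int) := by push_cast; ring
  have h2 : (((k + 3 : Nat) : Int) + 3) = ((k + 6 : Nat) : Int) := by push_cast; ring
  rw [h1, h2, PySem.List.slice_natCast, PySem.List.slice_natCast, List.drop_drop]
  have e1 : k + 6 - (k + 3) = 3 := by omega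
  have e2 : k + 3 - k = 3 := by omega
  have e3 : 3 + k = k + 3 := by omega
  rw [e1, e2, e3]

lemma altLoop_nil (b : PySem.Dict Int Int) (e : Int) : part3AltLoop b e [] = e := by
  rw [part3AltLoop]
  simp

lemma altLoop_step (b : PySem.Dict Int Int) (e : Int) (l : List Char) (h : l ≠ []) :
    part3AltLoop b e l = part3AltLoop b
      (e + b.getD (((PySem.List.slice l none (some 3)).map
        (fun c => if c ≠ 'x' then (1 : Int) else 0)).sum) 0)
      (PySem.List.slice l (some 3) none) := by
  conv_lhs => rw [part3AltLoop]
  rw [if_neg h]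

lemma altLoop_acc : ∀ (n : Nat) (l : List Char), l.length ≤ n → ∀ e : Int,
    part3AltLoop bonusD e l = e + part3AltLoop bonusD 0 l := by
  intro n
  induction n with
  | zero =>
    intro l h e
    have : l = [] := by cases l <;> simp_all
    subst this
    simp [altLoop_nil]
  | succ n ih =>
    intro l h e
    rcases eq_or_ne l [] with rfl | hne
    · simp [altLoop_nil]
    · rw [altLoop_step _ e _ hne, altLoop_step _ 0 _ hne]
      have hd : PySem.List.slice l (some 3) none = l.drop 3 :=
        PySem.List.slice_from _ (by norm_num)
      have hlen : (l.drop 3).length ≤ n := by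
        have : l.length ≠ 0 := by simpa [List.length_eq_zero_iff] using hne
        simp; omega
      rw [hd, ih _ hlen]
      conv_rhs => rw [ih _ hlen]
      ring

lemma take3_len_le (l : List Char) : ((l.take 3).filter (· ≠ 'x')).length ≤ 3 :=
  le_trans (List.length_filter_le _ _) (by simp)

-- the per-chunk identity: A's scored-and-bonused term = chunk char-score sum + B's bonus
lemma chunk_eq (l : List Char) :
    termA l 0 = ((l.take 3).map scA).sum
      + bonusD.getD ((((l.take 3).filter (· ≠ 'x')).length : Nat) : Int) 0 := by
  unfold termA
  have hsl : PySem.List.slice l (some 0) (some (0 + 3)) = l.take 3 := by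
    have h03 : (0:Int) + 3 = 3 := by norm_num
    rw [h03, PySem.List.slice_zero_start, PySem.List.slice_to _ (by norm_num)]
    rfl
  rw [hsl, bonus_getD _ (take3_len_le l)]
  have hfil := sum_scA_filter (l.take 3)
  obtain ⟨m, hm⟩ : ∃ m, ((l.take 3).filter (· ≠ 'x')).length = m := ⟨_, rfl⟩
  have hm3 : m ≤ 3 := hm ▸ take3_len_le l
  interval_cases m <;> simp only [ne_eq, decide_not] at hm hfil
  · rw [List.length_eq_zero_iff.mp hm] at hfil
    simp [hm]
    rw [← List.map_take, ← hfil]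
    simp
  · simp [hm, hfil]
  · simp [hm, hfil]
  · simp [hm, hfil]

lemma main_lemma : ∀ (n : Nat) (l : List Char), l.length ≤ n →
    (PySem.List.pyRange 0 (l.length : Int) 3).foldl (fun ans i =>
      let s := PySem.List.slice l (some i) (some (i + 3))
      let s2 := PySem.Chars.replace s ['x'] []
      if s2.length = 1 then ans + part1 (String.ofList s2)
      else if s2.length = 2 then ans + (part1 (String.ofList s2) + 2)
      else if s2.length = 3 then ans + (part1 (String.ofList s2) + 6)
      else ans) 0
    = (l.map scA).sum + part3AltLoop bonusD 0 l := by
  intro n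
  induction n with
  | zero =>
    intro l h
    have : l = [] := by cases l <;> simp_all
    subst this
    simp [altLoop_nil, pyRange3_nil 0 le_rfl]
  | succ n ih =>
    intro l h
    rcases eq_or_ne l [] with rfl | hne
    · simp [altLoop_nil, pyRange3_nil 0 le_rfl]
    · have hlpos : 0 < l.length := List.length_pos_iff.mpr hne
      have hbody : (fun (ans : Int) (i : Int) =>
          let s := PySem.List.slice l (some i) (some (i + 3))
          let s2 := PySem.Chars.replace s ['x'] []
          if s2.length = 1 then ans + part1 (String.ofList s2)
          else if s2.length = 2 then ans + (part1 (String.ofList s2) + 2)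
          else if s2.length = 3 then ans + (part1 (String.ofList s2) + 6)
          else ans)
          = fun ans i => ans + termA l i := by
        funext ans i
        simp only [replace_x, part1_eq_sum, termA]
        split_ifs <;> ring
      have hbody' : ∀ (l' : List Char), (fun (ans : Int) (i : Int) =>
          let s := PySem.List.slice l' (some i) (some (i + 3))
          let s2 := PySem.Chars.replace s ['x'] []
          if s2.length = 1 then ans + part1 (String.ofList s2)
          else if s2.length = 2 then ans + (part1 (String.ofList s2) + 2)
          else if s2.length = 3 then ans + (part1 (String.ofList s2) + 6)
          else ans)
          = fun ans i => ans + termA l' i := by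
        intro l'
        funext ans i
        simp only [replace_x, part1_eq_sum, termA]
        split_ifs <;> ring
      rw [hbody, pyRange3_cons _ (by exact_mod_cast hlpos)]
      rw [List.foldl_cons, List.foldl_map, PySem.List.foldl_add]
      have hrange : PySem.List.pyRange 0 ((l.length : Int) - 3) 3
          = PySem.List.pyRange 0 (((l.drop 3).length : Int)) 3 := by
        rcases le_or_gt 3 l.length with h3 | h3
        · congr 1; simp; omega
        · rw [pyRange3_nil _ (by omega), pyRange3_nil _ (by simp; omega)]
      have hmapc : (PySem.List.pyRange 0 ((l.length : Int) - 3) 3).map (fun i => termA l (i + 3))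
          = (PySem.List.pyRange 0 (((l.drop 3).length : Int)) 3).map (termA (l.drop 3)) := by
        rw [hrange]
        exact List.map_congr_left (fun i hi => termA_shift l i (mem_range3_nonneg hi))
      have hIH := ih (l.drop 3) (by have := hlpos; simp; omega)
      rw [hbody' (l.drop 3), PySem.List.foldl_add] at hIH
      rw [hmapc]
      -- unfold B's loop once on l
      rw [altLoop_step _ 0 _ hne]
      have hg : PySem.List.slice l none (some 3) = l.take 3 := by
        rw [PySem.List.slice_to _ (by norm_num)]; rfl
      have hd : PySem.List.slice l (some 3) none = l.drop 3 :=
        PySem.List.slice_from _ (by norm_num)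
      rw [hg, hd, cnt_eq_filter_length, altLoop_acc n (l.drop 3) (by have := hlpos; simp; omega)]
      have hsplit : (l.map scA).sum = ((l.take 3).map scA).sum + ((l.drop 3).map scA).sum := by
        rw [← List.sum_append, ← List.map_append, List.take_append_drop]
      rw [hsplit, chunk_eq l]
      omega

-- ===== VERDICT (by name: the statement is the Claim_ definition above) =====
theorem part3_spec : Claim_equal_part3 := by
  intro a _
  unfold Spec_part3 part3 part3_alt
  rw [PySem.Str.len_eq, main_lemma a.toList.length a.toList le_rfl]
  simp only []
  congr 1
  exact congrArg List.sum (List.map_congr_left (fun c _ => (score_getD c).symm))
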